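-- pv_equiv track=rewrite | github.com/almirgon/LabP1 | Unidade-6/analyticsvotacao.py | conta_votos
-- ===== SOURCE A (Python) =====
-- def conta_votos(votacao,id):
-- 	votos_sim = 0
-- 	votos_nao = 0
-- 	saida = []
--
-- 	for elemento in votacao:
-- 		elemento = elemento.split(',')
-- 		if elemento[1] == str(id):
-- 			if elemento[4] == 'sim':
-- 				votos_sim += 1
-- 			else:
-- 				votos_nao += 1
-- 	saida.append(votos_sim)
-- 	saida.append(votos_nao)
-- 	return saida
-- ===== SOURCE B (Python) =====
-- def conta_votos(votacao, id):
--     groups = {}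
--     for e in votacao:
--         groups.setdefault(e.split(',')[1], []).append(e)
--     sel = groups.get(str(id), [])
--     sim = sum(1 for e in sel if e.split(',')[4] == 'sim')
--     return [sim, len(sel) - sim]
-- ===== Notes on version B (the rewrite author's own statement) =====
-- stated objective: alternative
-- what changed: Instead of one pass with two counters guarded by an id test, B first builds a hash index grouping every row by its poll-id field, then answers by a single dict lookup of str(id) followed by counting 'sim' in that group, deriving 'nao' by subtraction.
import Mathlib
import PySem

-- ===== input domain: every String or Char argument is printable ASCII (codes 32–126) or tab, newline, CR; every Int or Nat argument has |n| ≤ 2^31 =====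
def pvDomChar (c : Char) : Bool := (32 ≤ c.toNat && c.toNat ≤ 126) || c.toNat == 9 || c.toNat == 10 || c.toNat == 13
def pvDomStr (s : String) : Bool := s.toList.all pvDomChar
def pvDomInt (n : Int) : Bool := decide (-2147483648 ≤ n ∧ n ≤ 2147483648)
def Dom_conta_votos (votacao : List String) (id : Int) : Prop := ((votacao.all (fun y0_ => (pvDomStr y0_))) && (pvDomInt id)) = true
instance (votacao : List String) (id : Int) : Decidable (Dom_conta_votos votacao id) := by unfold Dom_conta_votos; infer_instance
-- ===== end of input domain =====

-- B replaces A's single guarded counting pass by a group-by index: it first buckets every row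
-- under its poll-id field in a dict, then answers with one lookup of str(id) and a count of
-- 'sim' inside that bucket, deriving 'nao' by subtraction; objective: alternative.

-- ===== PORT A =====
-- e.split(',') : sep is non-empty, so Python's split is Str.split? with the some case
def pySplitComma (e : String) : List String := (PySem.Str.split? e ",").getD []
def conta_votos (votacao : List String) (id : Int) : List Int :=
  -- the loop: state (votos_sim, votos_nao); elemento[k] → pyGetD (exact under Pre_)
  let r := votacao.foldl (fun (acc : Int × Int) elemento =>
    let fs := pySplitComma elemento
    if PySem.List.pyGetD fs 1 "" = PySem.Int.toStr id then
      if PySem.List.pyGetD fs 4 "" = "sim" then (acc.1 + 1, acc.2)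
      else (acc.1, acc.2 + 1)
    else acc) (0, 0)
  [r.1, r.2]

-- ===== PORT B =====
-- groups.setdefault(k, []).append(e)  ==  groups[k] = groups.get(k, []) + [e]  ==  Dict.modify
def conta_votos_alt (votacao : List String) (id : Int) : List Int :=
  let groups := votacao.foldl (fun (d : PySem.Dict String (List String)) e =>
    d.modify (PySem.List.pyGetD (pySplitComma e) 1 "") [] (· ++ [e])) PySem.Dict.empty
  let sel := groups.getD (PySem.Int.toStr id) []
  -- sum(1 for e in sel if e.split(',')[4] == 'sim')
  let sim := sel.foldl (fun (acc : Int) e =>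
    if PySem.List.pyGetD (pySplitComma e) 4 "" = "sim" then acc + 1 else acc) 0
  [sim, (sel.length : Int) - sim]

-- ===== PRECONDITION & SPEC =====
-- Pre_ excludes exactly the rows on which Python A raises IndexError: a row whose
-- comma-split has no second field, or a row matching the id with no fifth field.
def Pre_conta_votos (votacao : List String) (id : Int) : Prop :=
  ∀ e ∈ votacao, 2 ≤ (pySplitComma e).length ∧
    (PySem.List.pyGetD (pySplitComma e) 1 "" = PySem.Int.toStr id →
      5 ≤ (pySplitComma e).length)
instance (votacao : List String) (id : Int) : Decidable (Pre_conta_votos votacao id) := by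
  unfold Pre_conta_votos; infer_instance
def pvWitness_conta_votos : List String × Int := (["a,1,b,c,sim", "a,2,b,c,nao"], 1)

def Spec_conta_votos (votacao : List String) (id : Int) (out : List Int) : Prop := out = conta_votos_alt votacao id
instance (votacao : List String) (id : Int) (out : List Int) : Decidable (Spec_conta_votos votacao id out) := by unfold Spec_conta_votos; infer_instance

-- ===== CLAIM (what is proved, stated in full; the proofs are below) =====
def Claim_equal_conta_votos : Prop := ∀ (votacao : List String) (id : Int), Dom_conta_votos votacao id → Pre_conta_votos votacao id → Spec_conta_votos votacao id (conta_votos votacao id)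

-- ===== LEMMAS AND PROOFS =====

-- B's grouping loop: the bucket of key k is exactly the rows whose field 1 is k, in order.
theorem groups_getD (k : String) (l : List String) :
    ∀ (d : PySem.Dict String (List String)),
    (l.foldl (fun (d : PySem.Dict String (List String)) e =>
        d.modify (PySem.List.pyGetD (pySplitComma e) 1 "") [] (· ++ [e])) d).getD k [] =
      d.getD k [] ++ l.filter (fun e => PySem.List.pyGetD (pySplitComma e) 1 "" = k) := by
  induction l with
  | nil => intro d; simp
  | cons x l ih =>
    intro d
    simp only [List.foldl_cons, List.filter_cons, ih]
    by_cases h : PySem.List.pyGetD (pySplitComma x) 1 "" = k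
    · simp [h]
    · simp [h, PySem.Dict.getD_modify, Ne.symm h]

-- B's counting loop counts the rows with field 4 = 'sim'.
theorem sim_count (l : List String) : ∀ (a : Int),
    l.foldl (fun (acc : Int) e =>
      if PySem.List.pyGetD (pySplitComma e) 4 "" = "sim" then acc + 1 else acc) a =
    a + ((l.filter (fun e => PySem.List.pyGetD (pySplitComma e) 4 "" = "sim")).length : Int) := by
  induction l with
  | nil => intro a; simp
  | cons x l ih =>
    intro a
    by_cases h : PySem.List.pyGetD (pySplitComma x) 4 "" = "sim" <;>
      simp [h, ih]; ring

-- A's loop, characterised over the filtered rows.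
theorem conta_votos_loop (id : Int) (l : List String) : ∀ (s n : Int),
    l.foldl (fun (acc : Int × Int) elemento =>
      let fs := pySplitComma elemento
      if PySem.List.pyGetD fs 1 "" = PySem.Int.toStr id then
        if PySem.List.pyGetD fs 4 "" = "sim" then (acc.1 + 1, acc.2)
        else (acc.1, acc.2 + 1)
      else acc) (s, n) =
    (let sel := l.filter (fun e => PySem.List.pyGetD (pySplitComma e) 1 "" = PySem.Int.toStr id)
     let c : Int := ((sel.filter (fun e => PySem.List.pyGetD (pySplitComma e) 4 "" = "sim")).length : Int)
     (s + c, n + ((sel.length : Int) - c))) := by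
  induction l with
  | nil => intro s n; simp
  | cons x l ih =>
    intro s n
    simp only [List.foldl_cons, List.filter_cons]
    by_cases h1 : PySem.List.pyGetD (pySplitComma x) 1 "" = PySem.Int.toStr id
    · by_cases h4 : PySem.List.pyGetD (pySplitComma x) 4 "" = "sim" <;>
        simp [h1, h4, ih] <;> ring
    · simp [h1, ih]

-- ===== VERDICT (by name: the statement is the Claim_ definition above) =====
theorem conta_votos_spec : Claim_equal_conta_votos := by
  intro votacao id _ _
  unfold Spec_conta_votos conta_votos conta_votos_alt
  simp only [conta_votos_loop, groups_getD, sim_count, PySem.Dict.getD_empty]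
  simp
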